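-- pv_equiv track=rewrite | github.com/BlueScreenMaker/Yeummy_Algorithm | Programmers/게임아이템.py | solution
-- ===== SOURCE A (Python) =====
-- from collections import deque
-- import heapq
--
-- def solution(healths, items):
--     answer = []
--     healths.sort()
--     idx_items = sorted([(item[1], item[0], idx) for idx, item in enumerate(items, 1)])
--     idx_items = deque(idx_items)
--
--     item_save = []
--     heapq.heapify(item_save)
--
--     for hp in healths:
--         while idx_items:
--             damage, attack, idx = idx_items[0]
--             if hp-damage < 100:
--                 break
--             idx_items.popleft()
--
--             heapq.heappush(item_save, (-attack, idx))
--         if item_save: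
--             _, idx = heapq.heappop(item_save)
--             answer.append(idx)
--
--     return sorted(answer)
-- ===== SOURCE B (Python) =====
-- def solution(healths, items):
--     # Same greedy as A (sorts healths in place, like A), but no heapq/deque:
--     # a sorted index list with a pointer admits affordable items into a plain
--     # pool, and each pick is a linear max-scan (max attack, tie: smallest index).
--     healths.sort()
--     order = sorted(range(1, len(items) + 1),
--                    key=lambda i: (items[i - 1][1], items[i - 1][0]))
--     pool = []
--     p = 0
--     answer = []
--     for hp in healths:
--         while p < len(order) and hp - items[order[p] - 1][1] >= 100:
--             pool.append(order[p])
--             p += 1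
--         if pool:
--             best = pool[0]
--             for j in pool[1:]:
--                 if items[j - 1][0] > items[best - 1][0] or \
--                    (items[j - 1][0] == items[best - 1][0] and j < best):
--                     best = j
--             answer.append(best)
--             pool.remove(best)
--     return sorted(answer)
-- ===== Notes on version B (the rewrite author's own statement) =====
-- stated objective: simpler
-- what changed: Replaces A's heapq+deque machinery with a sorted 1-based index list consumed by a pointer and a plain pool list from which each pick is found by a linear max-attack scan (tie: smallest index), removing both imports entirely.
import Mathlib
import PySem

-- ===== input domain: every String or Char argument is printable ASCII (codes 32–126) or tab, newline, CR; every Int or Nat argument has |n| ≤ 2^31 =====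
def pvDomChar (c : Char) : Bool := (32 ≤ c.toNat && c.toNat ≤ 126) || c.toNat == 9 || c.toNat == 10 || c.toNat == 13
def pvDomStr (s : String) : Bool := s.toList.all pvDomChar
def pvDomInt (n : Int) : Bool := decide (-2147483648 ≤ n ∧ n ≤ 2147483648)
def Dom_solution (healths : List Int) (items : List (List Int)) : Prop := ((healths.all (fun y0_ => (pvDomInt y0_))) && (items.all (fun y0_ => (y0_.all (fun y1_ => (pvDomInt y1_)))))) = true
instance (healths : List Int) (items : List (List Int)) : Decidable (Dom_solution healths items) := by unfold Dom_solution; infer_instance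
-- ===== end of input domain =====

-- B replaces A's heapq/deque machinery with a sorted index list, a plain pool and a
-- linear max-scan per pick (simpler, no heap).  Both Pythons sort `healths` in place
-- (same side effect); the equivalence proved here is about the return value.

-- ===== PORT A =====
-- Python compares the tuples (-attack, idx) lexicographically.
def pairLt (x y : Int × Int) : Bool := x.1 < y.1 || (x.1 == y.1 && x.2 < y.2)

-- the inner `while idx_items:` loop: admit every leading item with hp-damage >= 100,
-- pushing (-attack, idx) onto item_save (heap contents as a multiset, see below)
def admitA (hp : Int) : List (Int × Int × Int) → List (Int × Int) → List (Int × Int × Int) × List (Int × Int)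
  | [], save => ([], save)
  | t :: rest, save =>
      if hp - t.1 < 100 then (t :: rest, save)
      else admitA hp rest (save ++ [(-t.2.1, t.2.2)])

-- one iteration of `for hp in healths`.  heapq is ported by its exact value contract:
-- the heap is kept as the list of its elements (heappush appends); heappop returns the
-- lexicographic minimum and removes one occurrence of it — value-exact for every use A
-- makes of the heap (push, pop, truthiness).
def stepA (st : List (Int × Int × Int) × List (Int × Int) × List Int) (hp : Int) :
    List (Int × Int × Int) × List (Int × Int) × List Int :=
  match admitA hp st.1 st.2.1 with
  | (idxs, []) => (idxs, [], st.2.2)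
  | (idxs, m0 :: t) =>
      let m := t.foldl (fun acc x => if pairLt x acc then x else acc) m0
      (idxs, (m0 :: t).erase m, st.2.2 ++ [m.2])

def solution (healths : List Int) (items : List (List Int)) : List Int :=
  let hs := PySem.List.sorted healths (fun x => x) false
  -- Python sorts the triples (damage, attack, idx) lexicographically; the idx components
  -- are strictly increasing along the enumerated list, so the stable sort by the first
  -- two components (sorted2) yields the identical list — value-exact.
  let idx_items := PySem.List.sorted2
      ((PySem.List.enumerate items 1).map
        (fun p => ((PySem.List.pyGet? p.2 1).getD 0, (PySem.List.pyGet? p.2 0).getD 0, p.1)))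
      (fun t => t.1) (fun t => t.2.1) false
  let res := hs.foldl stepA (idx_items, [], [])
  PySem.List.sorted res.2.2 (fun x => x) false

-- ===== PORT B =====
-- items[i-1][1] and items[i-1][0] (1-based index i)
def dmgB (items : List (List Int)) (i : Int) : Int :=
  (PySem.List.pyGet? ((PySem.List.pyGet? items (i - 1)).getD []) 1).getD 0
def atkB (items : List (List Int)) (i : Int) : Int :=
  (PySem.List.pyGet? ((PySem.List.pyGet? items (i - 1)).getD []) 0).getD 0

-- the strict "j is a better pick than b" test of B's linear scan
def betterB (items : List (List Int)) (j b : Int) : Bool :=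
  atkB items b < atkB items j || (atkB items j == atkB items b && j < b)

-- B's `while p < len(order) and hp - items[order[p]-1][1] >= 100` pointer loop,
-- transcribed on the remaining suffix of `order`
def admitB (items : List (List Int)) (hp : Int) : List Int → List Int → List Int × List Int
  | [], pool => ([], pool)
  | i :: rest, pool =>
      if 100 ≤ hp - dmgB items i then admitB items hp rest (pool ++ [i])
      else (i :: rest, pool)

def stepB (items : List (List Int)) (st : List Int × List Int × List Int) (hp : Int) :
    List Int × List Int × List Int :=
  match admitB items hp st.1 st.2.1 with
  | (ord, []) => (ord, [], st.2.2)
  | (ord, b0 :: t) =>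
      let best := t.foldl (fun b j => if betterB items j b then j else b) b0
      -- pool.remove(best): best is always in the pool, so getD never fires
      (ord, (PySem.List.remove? (b0 :: t) best).getD (b0 :: t), st.2.2 ++ [best])

def solution_alt (healths : List Int) (items : List (List Int)) : List Int :=
  let hs := PySem.List.sorted healths (fun x => x) false
  -- sorted(range(1, len(items)+1), key=lambda i: (items[i-1][1], items[i-1][0]))
  let order := PySem.List.sorted2 (PySem.List.pyRange 1 ((items.length : Int) + 1) 1)
      (dmgB items) (atkB items) false
  let res := hs.foldl (stepB items) (order, [], [])
  PySem.List.sorted res.2.2 (fun x => x) false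

-- ===== PRECONDITION & SPEC =====
-- A indexes item[0] and item[1] of every item while building idx_items, so it raises
-- IndexError whenever some item has fewer than two entries; exactly those inputs are excluded.
def Pre_solution (healths : List Int) (items : List (List Int)) : Prop :=
  ∀ it ∈ items, 2 ≤ it.length
instance (healths : List Int) (items : List (List Int)) : Decidable (Pre_solution healths items) := by
  unfold Pre_solution; infer_instance

def pvWitness_solution : List Int × List (List Int) := ([200, 150], [[5, 10], [7, 10]])

def Spec_solution (healths : List Int) (items : List (List Int)) (out : List Int) : Prop :=
  out = solution_alt healths items
instance (healths : List Int) (items : List (List Int)) (out : List Int) : Decidable (Spec_solution healths items out) := by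
  unfold Spec_solution; infer_instance

-- ===== CLAIM (what is proved, stated in full; the proofs are below) =====
def Claim_equal_solution : Prop := ∀ (healths : List Int) (items : List (List Int)), Dom_solution healths items → Pre_solution healths items → Spec_solution healths items (solution healths items)

-- ===== LEMMAS AND PROOFS =====

-- the two coupling maps: B's index i stands for A's triple gF i and heap entry fF i
def gF (items : List (List Int)) (i : Int) : Int × Int × Int := (dmgB items i, atkB items i, i)
def fF (items : List (List Int)) (i : Int) : Int × Int := (-(atkB items i), i)

theorem fF_injective (items : List (List Int)) : Function.Injective (fF items) := by
  intro a b h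
  simpa [fF] using congrArg Prod.snd h

theorem insertBy_map {α β : Type} (f : α → β) (bf : α → α → Bool) (bg : β → β → Bool)
    (h : ∀ a b, bg (f a) (f b) = bf a b) (x : α) (l : List α) :
    PySem.List.insertBy bg (f x) (l.map f) = (PySem.List.insertBy bf x l).map f := by
  induction l with
  | nil => simp [PySem.List.insertBy]
  | cons y ys ih =>
      simp only [List.map_cons, PySem.List.insertBy, h]
      by_cases hb : bf x y = true
      · simp [hb]
      · simp [hb, ih]

theorem foldl_insertBy_map {α β : Type} (f : α → β) (bf : α → α → Bool) (bg : β → β → Bool)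
    (h : ∀ a b, bg (f a) (f b) = bf a b) (l : List α) (acc : List α) :
    (l.map f).foldl (fun a x => PySem.List.insertBy bg x a) (acc.map f)
      = (l.foldl (fun a x => PySem.List.insertBy bf x a) acc).map f := by
  induction l generalizing acc with
  | nil => rfl
  | cons y ys ih =>
      simp only [List.map_cons, List.foldl_cons]
      rw [insertBy_map f bf bg h, ih]

-- A's enumerated triple list is B's index range mapped through gF
theorem triples_eq (items : List (List Int)) :
    (PySem.List.enumerate items 1).map
        (fun p => ((PySem.List.pyGet? p.2 1).getD 0, (PySem.List.pyGet? p.2 0).getD 0, p.1))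
      = (PySem.List.pyRange 1 ((items.length : Int) + 1) 1).map (gF items) := by
  apply List.ext_getElem
  · simp [PySem.List.length_enumerate, PySem.List.length_pyRange_one]
  · intro k h1 h2
    have hk : k < items.length := by
      simpa [PySem.List.length_enumerate] using h1
    simp only [List.getElem_map, PySem.List.getElem_enumerate, PySem.List.getElem_pyRange_one]
    have hcast : ((1 : Int) + k - 1) = (k : Int) := by omega
    simp [gF, dmgB, atkB, hcast, hk]

-- A's sorted triple list is B's sorted order list mapped through gF
theorem sorted_rel (items : List (List Int)) :
    PySem.List.sorted2
        ((PySem.List.enumerate items 1).map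
          (fun p => ((PySem.List.pyGet? p.2 1).getD 0, (PySem.List.pyGet? p.2 0).getD 0, p.1)))
        (fun t => t.1) (fun t => t.2.1) false
      = (PySem.List.sorted2 (PySem.List.pyRange 1 ((items.length : Int) + 1) 1)
          (dmgB items) (atkB items) false).map (gF items) := by
  rw [triples_eq]
  simp only [PySem.List.sorted2]
  exact foldl_insertBy_map (gF items) _ _ (fun a b => rfl) _ []

theorem admit_rel (items : List (List Int)) (hp : Int) :
    ∀ (ord : List Int) (pool : List Int),
      admitA hp (ord.map (gF items)) (pool.map (fF items))
        = ((admitB items hp ord pool).1.map (gF items), (admitB items hp ord pool).2.map (fF items)) := by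
  intro ord
  induction ord with
  | nil => intro pool; simp [admitA, admitB]
  | cons i rest ih =>
      intro pool
      simp only [List.map_cons, admitA, admitB, gF]
      by_cases h : hp - dmgB items i < 100
      · rw [if_pos h, if_neg (by omega)]
        simp [gF]
      · rw [if_neg h, if_pos (by omega)]
        have : (pool.map (fF items)) ++ [(-(atkB items i), i)] = (pool ++ [i]).map (fF items) := by
          simp [fF]
        rw [this, ih]

theorem pairLt_fF (items : List (List Int)) (j b : Int) :
    pairLt (fF items j) (fF items b) = betterB items j b := by
  simp only [pairLt, betterB, fF]
  rw [Bool.eq_iff_iff]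
  simp only [Bool.or_eq_true, Bool.and_eq_true, decide_eq_true_eq, beq_iff_eq]
  omega



theorem scan_rel (items : List (List Int)) :
    ∀ (t : List Int) (b : Int),
      (t.map (fF items)).foldl (fun acc x => if pairLt x acc then x else acc) (fF items b)
        = fF items (t.foldl (fun b j => if betterB items j b then j else b) b) := by
  intro t
  induction t with
  | nil => intro b; rfl
  | cons j rest ih =>
      intro b
      simp only [List.map_cons, List.foldl_cons, pairLt_fF]
      by_cases h : betterB items j b = true
      · rw [if_pos h, if_pos h, ih]
      · rw [if_neg h, if_neg h, ih]

theorem scan_mem (items : List (List Int)) :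
    ∀ (t : List Int) (b : Int),
      (t.foldl (fun b j => if betterB items j b then j else b) b) ∈ b :: t := by
  intro t
  induction t with
  | nil => intro b; exact List.mem_cons_self
  | cons j rest ih =>
      intro b
      simp only [List.foldl_cons]
      by_cases h : betterB items j b = true
      · rw [if_pos h]
        have := ih j
        simp only [List.mem_cons] at this ⊢
        tauto
      · rw [if_neg h]
        have := ih b
        simp only [List.mem_cons] at this ⊢
        tauto

theorem step_rel (items : List (List Int)) (ord pool ans : List Int) (hp : Int) :
    stepA (ord.map (gF items), pool.map (fF items), ans) hp
      = ((stepB items (ord, pool, ans) hp).1.map (gF items),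
         (stepB items (ord, pool, ans) hp).2.1.map (fF items),
         (stepB items (ord, pool, ans) hp).2.2) := by
  have hA := admit_rel items hp ord pool
  rcases hab : admitB items hp ord pool with ⟨ord', pool'⟩
  rw [hab] at hA
  simp only [stepA, stepB, hab, hA]
  cases pool' with
  | nil => simp
  | cons b0 t =>
    simp only [List.map_cons]
    have hscan := scan_rel items t b0
    have hbest := scan_mem items t b0
    set best := t.foldl (fun b j => if betterB items j b then j else b) b0 with hbdef
    rw [PySem.List.remove?_eq_some_erase (b0 :: t) best hbest]
    simp only [Option.getD_some]
    have herase : ((b0 :: t).map (fF items)).erase (fF items best)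
        = ((b0 :: t).erase best).map (fF items) :=
      (List.map_erase (fF_injective items) (b0 :: t)).symm
    simp only [List.map_cons] at herase
    rw [hscan, herase]
    simp [fF]

theorem foldl_rel (items : List (List Int)) (hs : List Int) :
    ∀ (ord pool ans : List Int),
      hs.foldl stepA (ord.map (gF items), pool.map (fF items), ans)
        = ((hs.foldl (stepB items) (ord, pool, ans)).1.map (gF items),
           (hs.foldl (stepB items) (ord, pool, ans)).2.1.map (fF items),
           (hs.foldl (stepB items) (ord, pool, ans)).2.2) := by
  induction hs with
  | nil => intro ord pool ans; rfl
  | cons hp rest ih =>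
      intro ord pool ans
      simp only [List.foldl_cons, step_rel items ord pool ans hp]
      rcases hS : stepB items (ord, pool, ans) hp with ⟨o', p', a'⟩
      exact ih o' p' a'

-- ===== VERDICT (by name: the statement is the Claim_ definition above) =====
theorem solution_spec : Claim_equal_solution := by
  intro healths items _ _
  show solution healths items = solution_alt healths items
  simp only [solution, solution_alt]
  rw [sorted_rel items]
  have := foldl_rel items (PySem.List.sorted healths (fun x => x) false)
      (PySem.List.sorted2 (PySem.List.pyRange 1 ((items.length : Int) + 1) 1)
        (dmgB items) (atkB items) false) [] []
  simp only [List.map_nil] at this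
  rw [this]
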